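-- pv_equiv track=rewrite | github.com/2hwayoung/algorithm-study | 시험/toss_ex1 copy 6.py | solution
-- ===== SOURCE A (Python) =====
-- def solution(steps_one, names_one, steps_two, names_two, steps_three, names_three):
--     step_dict = {}
--
--     for i in range(len(names_one)):
--         step_dict[names_one[i]] = [steps_one[i]]
--     for i in range(len(names_two)):
--         if not names_two[i] in step_dict:
--             step_dict[names_two[i]] = [0]
--         step_dict[names_two[i]].append(steps_two[i])
--     for i in range(len(names_three)):
--         if not names_three[i] in step_dict:
--             step_dict[names_three[i]] = [0,0]
--         elif len(step_dict[names_three[i]]) == 1: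
--             step_dict[names_three[i]].append(0)
--         step_dict[names_three[i]].append(steps_three[i])
--
--     sortedList = sorted(step_dict.items(), key = lambda item: (sum(item[1]), item[0]), reverse = True)
--     answer = []
--     for item in sortedList:
--         answer.append(item[0])
--     return answer
-- ===== SOURCE B (Python) =====
-- def solution(steps_one, names_one, steps_two, names_two, steps_three, names_three):
--     names = []
--     for n in names_one + names_two + names_three:
--         if n not in names:
--             names.append(n)
--
--     def tot(nm):
--         t = 0
--         for n, s in zip(names_one, steps_one):
--             if n == nm:
--                 t = s
--         for n, s in zip(names_two, steps_two):
--             if n == nm: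
--                 t += s
--         for n, s in zip(names_three, steps_three):
--             if n == nm:
--                 t += s
--         return t
--
--     return sorted(names, key=lambda nm: (tot(nm), nm), reverse=True)
-- ===== Notes on version B (the rewrite author's own statement) =====
-- stated objective: alternative
-- what changed: B drops the dict entirely: it builds the ordered list of distinct names once, recomputes each name's total on demand by rescanning the three zipped lists (last assignment for list one, addition for the others), and sorts the names by that computed key; it trades A's single-pass dict accumulation with per-name step lists and zero-padding for stateless per-name recomputation.
import Mathlib
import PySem

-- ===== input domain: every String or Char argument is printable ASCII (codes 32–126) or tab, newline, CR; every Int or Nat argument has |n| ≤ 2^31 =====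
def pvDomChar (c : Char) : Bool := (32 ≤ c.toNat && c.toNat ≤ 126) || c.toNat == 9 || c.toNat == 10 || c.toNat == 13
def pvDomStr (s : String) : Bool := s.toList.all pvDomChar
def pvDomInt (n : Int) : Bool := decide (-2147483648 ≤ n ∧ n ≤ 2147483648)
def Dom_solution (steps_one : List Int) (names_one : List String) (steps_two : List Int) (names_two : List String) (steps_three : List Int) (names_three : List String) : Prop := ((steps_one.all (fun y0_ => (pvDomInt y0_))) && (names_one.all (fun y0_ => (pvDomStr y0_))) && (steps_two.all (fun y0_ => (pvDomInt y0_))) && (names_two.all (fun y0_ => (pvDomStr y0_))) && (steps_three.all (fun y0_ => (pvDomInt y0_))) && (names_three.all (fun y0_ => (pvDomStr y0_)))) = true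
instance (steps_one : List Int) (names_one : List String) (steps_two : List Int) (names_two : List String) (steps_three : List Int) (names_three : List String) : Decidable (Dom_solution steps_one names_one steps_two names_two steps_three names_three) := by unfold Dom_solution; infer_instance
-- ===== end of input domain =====

-- B drops the dict entirely: it builds the ordered distinct-name list once, recomputes each
-- name's total on demand by rescanning the three zipped lists, and sorts the names by that key.

-- ===== PORT A =====
-- step_dict[name].append(x) is ported as modify with default []: inside Pre_ the key is always
-- present at that point (the branch just above inserts it), so the default is never read.
def solution (steps_one : List Int) (names_one : List String) (steps_two : List Int) (names_two : List String) (steps_three : List Int) (names_three : List String) : List String :=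
  let d0 : PySem.Dict String (List Int) := PySem.Dict.empty
  let d1 := (PySem.List.pyRange 0 (PySem.List.len names_one)).foldl (fun d i =>
      d.insert (PySem.List.pyGetD names_one i "") [PySem.List.pyGetD steps_one i 0]) d0
  let d2 := (PySem.List.pyRange 0 (PySem.List.len names_two)).foldl (fun d i =>
      let name := PySem.List.pyGetD names_two i ""
      let d := if d.contains name = false then d.insert name [0] else d
      d.modify name [] (fun l => l ++ [PySem.List.pyGetD steps_two i 0])) d1
  let d3 := (PySem.List.pyRange 0 (PySem.List.len names_three)).foldl (fun d i =>
      let name := PySem.List.pyGetD names_three i ""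
      let d := if d.contains name = false then d.insert name [0, 0]
               else if (d.getD name []).length = 1 then d.modify name [] (fun l => l ++ [0]) else d
      d.modify name [] (fun l => l ++ [PySem.List.pyGetD steps_three i 0])) d2
  let sortedList := PySem.List.sorted2 d3.items (fun item => item.2.sum) (fun item => item.1) true
  sortedList.foldl (fun answer item => answer ++ [item.1]) []

-- ===== PORT B =====
def solution_alt (steps_one : List Int) (names_one : List String) (steps_two : List Int) (names_two : List String) (steps_three : List Int) (names_three : List String) : List String :=
  let names := (names_one ++ names_two ++ names_three).foldl
      (fun ks n => if ks.contains n then ks else ks ++ [n]) ([] : List String)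
  let tot : String → Int := fun nm =>
    let t1 := (names_one.zip steps_one).foldl (fun t p => if p.1 == nm then p.2 else t) 0
    let t2 := (names_two.zip steps_two).foldl (fun t p => if p.1 == nm then t + p.2 else t) t1
    (names_three.zip steps_three).foldl (fun t p => if p.1 == nm then t + p.2 else t) t2
  PySem.List.sorted2 names (fun nm => tot nm) (fun nm => nm) true

-- ===== PRECONDITION & SPEC =====
-- Pre_ excludes exactly the inputs where A raises IndexError: a names list longer than its steps list.
def Pre_solution (steps_one : List Int) (names_one : List String) (steps_two : List Int) (names_two : List String) (steps_three : List Int) (names_three : List String) : Prop :=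
  names_one.length ≤ steps_one.length ∧ names_two.length ≤ steps_two.length ∧ names_three.length ≤ steps_three.length
instance (steps_one : List Int) (names_one : List String) (steps_two : List Int) (names_two : List String) (steps_three : List Int) (names_three : List String) : Decidable (Pre_solution steps_one names_one steps_two names_two steps_three names_three) := by unfold Pre_solution; infer_instance
def pvWitness_solution : List Int × List String × List Int × List String × List Int × List String :=
  ([1, 2], ["a", "b"], [3], ["a"], [5], ["c"])

def Spec_solution (steps_one : List Int) (names_one : List String) (steps_two : List Int) (names_two : List String) (steps_three : List Int) (names_three : List String) (out : List String) : Prop := out = solution_alt steps_one names_one steps_two names_two steps_three names_three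
instance (steps_one : List Int) (names_one : List String) (steps_two : List Int) (names_two : List String) (steps_three : List Int) (names_three : List String) (out : List String) : Decidable (Spec_solution steps_one names_one steps_two names_two steps_three names_three out) := by unfold Spec_solution; infer_instance

-- ===== CLAIM (what is proved, stated in full; the proofs are below) =====
def Claim_equal_solution : Prop := ∀ (steps_one : List Int) (names_one : List String) (steps_two : List Int) (names_two : List String) (steps_three : List Int) (names_three : List String), Dom_solution steps_one names_one steps_two names_two steps_three names_three → Pre_solution steps_one names_one steps_two names_two steps_three names_three → Spec_solution steps_one names_one steps_two names_two steps_three names_three (solution steps_one names_one steps_two names_two steps_three names_three)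

-- ===== LEMMAS AND PROOFS =====

-- STAGE 1: A's list dict, with every per-name list collapsed to its sum, is this int dict
-- (A's loops rewritten over zip, in A's (step, name) pair orientation).
def pvDictB (steps_one : List Int) (names_one : List String) (steps_two : List Int) (names_two : List String) (steps_three : List Int) (names_three : List String) : PySem.Dict String Int :=
  let d1 := (steps_one.zip names_one).foldl (fun d p => d.insert p.2 p.1) (PySem.Dict.empty : PySem.Dict String Int)
  let d2 := (steps_two.zip names_two).foldl (fun d p => d.modify p.2 0 (fun t => t + p.1)) d1
  (steps_three.zip names_three).foldl (fun d p => d.modify p.2 0 (fun t => t + p.1)) d2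

def pvF (p : String × List Int) : String × Int := (p.1, p.2.sum)

-- relation: the int dict's items are A's items with each step list collapsed to its sum
def pvR (dA : PySem.Dict String (List Int)) (dB : PySem.Dict String Int) : Prop :=
  dB.items = dA.items.map pvF

theorem pvContains_R (dA : PySem.Dict String (List Int)) (dB : PySem.Dict String Int)
    (h : pvR dA dB) (k : String) : dB.contains k = dA.contains k := by
  have he : dB.items = dA.items.map pvF := h
  rw [PySem.Dict.contains, PySem.Dict.contains, he, List.any_map]
  rfl

theorem pvGet?_R (dA : PySem.Dict String (List Int)) (dB : PySem.Dict String Int)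
    (h : pvR dA dB) (k : String) : dB.get? k = (dA.get? k).map List.sum := by
  have he : dB.items = dA.items.map pvF := h
  rw [PySem.Dict.get?, PySem.Dict.get?, he]
  generalize dA.items = l
  induction l with
  | nil => rfl
  | cons p rest ih =>
      rw [List.map_cons]
      by_cases hk : (p.1 == k) = true
      · simp [pvF, hk]
      · simp only [List.find?_cons, pvF, hk]
        exact ih

theorem pvGetD_R (dA : PySem.Dict String (List Int)) (dB : PySem.Dict String Int)
    (h : pvR dA dB) (k : String) : dB.getD k 0 = (dA.getD k []).sum := by
  simp only [PySem.Dict.getD, pvGet?_R dA dB h k]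
  cases dA.get? k <;> simp

theorem pvGetD_R_zero (dA : PySem.Dict String (List Int)) (dB : PySem.Dict String Int)
    (h : pvR dA dB) (k : String) (hc : dA.contains k = false) : dB.getD k 0 = 0 := by
  have : dB.get? k = none := by
    rw [pvGet?_R dA dB h k, (PySem.Dict.get?_eq_none_iff_contains dA k).2 hc]
    rfl
  simp [PySem.Dict.getD, this]

theorem pvInsert_R (dA : PySem.Dict String (List Int)) (dB : PySem.Dict String Int)
    (h : pvR dA dB) (k : String) (v : List Int) :
    pvR (dA.insert k v) (dB.insert k v.sum) := by
  have he : dB.items = dA.items.map pvF := h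
  show (dB.insert k v.sum).items = (dA.insert k v).items.map pvF
  rw [PySem.Dict.insert, PySem.Dict.insert, pvContains_R dA dB h k]
  by_cases hc : dA.contains k = true
  · rw [if_pos hc]
    rw [if_pos hc]
    show dB.items.map _ = (dA.items.map _).map pvF
    rw [he, List.map_map, List.map_map]
    apply List.map_congr_left
    intro p _
    by_cases hk : (p.1 == k) = true
    · simp only [Function.comp_apply, pvF, hk]
      rfl
    · simp only [Function.comp_apply, pvF, hk]
      rfl
  · rw [if_neg hc]
    rw [if_neg hc]
    show dB.items ++ [(k, v.sum)] = (dA.items ++ [(k, v)]).map pvF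
    rw [List.map_append, he]
    rfl

-- A's loop-2 body vs the int dict's loop-2 body
theorem pvStep2_R (dA : PySem.Dict String (List Int)) (dB : PySem.Dict String Int)
    (h : pvR dA dB) (n : String) (x : Int) :
    pvR ((if dA.contains n = false then dA.insert n [0] else dA).modify n [] (fun l => l ++ [x]))
        (dB.modify n 0 (fun t => t + x)) := by
  unfold PySem.Dict.modify
  by_cases hc : dA.contains n = false
  · rw [if_pos hc, PySem.Dict.getD_insert_self, PySem.Dict.insert_insert_self,
      pvGetD_R_zero dA dB h n hc]
    have := pvInsert_R dA dB h n ([0] ++ [x])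
    simpa using this
  · rw [if_neg hc, pvGetD_R dA dB h n]
    have := pvInsert_R dA dB h n (dA.getD n [] ++ [x])
    simpa using this

-- A's loop-3 body vs the int dict's loop-3 body
theorem pvStep3_R (dA : PySem.Dict String (List Int)) (dB : PySem.Dict String Int)
    (h : pvR dA dB) (n : String) (x : Int) :
    pvR ((if dA.contains n = false then dA.insert n [0, 0]
          else if (dA.getD n []).length = 1 then dA.modify n [] (fun l => l ++ [0]) else dA).modify n [] (fun l => l ++ [x]))
        (dB.modify n 0 (fun t => t + x)) := by
  unfold PySem.Dict.modify
  by_cases hc : dA.contains n = false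
  · rw [if_pos hc, PySem.Dict.getD_insert_self, PySem.Dict.insert_insert_self,
      pvGetD_R_zero dA dB h n hc]
    have := pvInsert_R dA dB h n ([0, 0] ++ [x])
    simpa using this
  · rw [if_neg hc]
    by_cases hl : (dA.getD n []).length = 1
    · rw [if_pos hl, PySem.Dict.getD_insert_self, PySem.Dict.insert_insert_self,
        pvGetD_R dA dB h n]
      have := pvInsert_R dA dB h n ((dA.getD n [] ++ [0]) ++ [x])
      simpa using this
    · rw [if_neg hl, pvGetD_R dA dB h n]
      have := pvInsert_R dA dB h n (dA.getD n [] ++ [x])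
      simpa using this

-- folds preserve a binary relation preserved by the step functions
theorem pvFoldl_rel {α γ δ : Type} (R : γ → δ → Prop) (fa : γ → α → γ) (fb : δ → α → δ)
    (hstep : ∀ c d a, R c d → R (fa c a) (fb d a)) :
    ∀ (l : List α) (c : γ) (d : δ), R c d → R (l.foldl fa c) (l.foldl fb d) := by
  intro l
  induction l with
  | nil => intro c d h; exact h
  | cons a t ih => intro c d h; exact ih _ _ (hstep c d a h)

-- A's index loop over range(len(names)) is a fold over zip(steps, names)
theorem pvRangeZipAux {δ : Type} (g : δ → Int → String → δ) :
    ∀ (ns : List String) (ss : List Int) (d : δ), ns.length ≤ ss.length →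
      (List.range ns.length).foldl (fun d k => g d (ss.getD k 0) (ns.getD k "")) d
        = (ss.zip ns).foldl (fun d p => g d p.1 p.2) d := by
  intro ns
  induction ns with
  | nil => intro ss d _; simp
  | cons n nt ih =>
      intro ss d hlen
      match ss with
      | [] => simp at hlen
      | s :: st =>
          rw [List.length_cons, List.range_succ_eq_map, List.foldl_cons, List.foldl_map]
          simp only [Nat.succ_eq_add_one, List.getD_cons_zero, List.getD_cons_succ]
          rw [ih st (g d s n) (by simpa using hlen)]
          rfl

theorem pvRangeZip {δ : Type} (g : δ → Int → String → δ)
    (ns : List String) (ss : List Int) (d : δ) (hlen : ns.length ≤ ss.length) :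
    (PySem.List.pyRange 0 (PySem.List.len ns)).foldl
        (fun d i => g d (PySem.List.pyGetD ss i 0) (PySem.List.pyGetD ns i "")) d
      = (ss.zip ns).foldl (fun d p => g d p.1 p.2) d := by
  rw [PySem.List.len, PySem.List.pyRange_zero_natCast, List.foldl_map]
  simp only [PySem.List.pyGetD_natCast]
  exact pvRangeZipAux g ns ss d hlen

-- the three loops of A, rewritten over zip (first-order forms for rw in the main proof)
theorem pvLoop1 (s1 : List Int) (n1 : List String) (d : PySem.Dict String (List Int))
    (h : n1.length ≤ s1.length) :
    List.foldl (fun d i => d.insert (PySem.List.pyGetD n1 i "") [PySem.List.pyGetD s1 i 0]) d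
        (PySem.List.pyRange 0 (PySem.List.len n1))
      = List.foldl (fun d p => d.insert p.2 [p.1]) d (s1.zip n1) :=
  pvRangeZip (fun d s n => d.insert n [s]) n1 s1 d h

theorem pvLoop2 (s2 : List Int) (n2 : List String) (d : PySem.Dict String (List Int))
    (h : n2.length ≤ s2.length) :
    List.foldl (fun d i =>
        (if d.contains (PySem.List.pyGetD n2 i "") = false
         then d.insert (PySem.List.pyGetD n2 i "") [0] else d).modify (PySem.List.pyGetD n2 i "") []
          (fun l => l ++ [PySem.List.pyGetD s2 i 0])) d
        (PySem.List.pyRange 0 (PySem.List.len n2))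
      = List.foldl (fun d p =>
          (if d.contains p.2 = false then d.insert p.2 [0] else d).modify p.2 []
            (fun l => l ++ [p.1])) d (s2.zip n2) :=
  pvRangeZip (fun d s n =>
    (if d.contains n = false then d.insert n [0] else d).modify n [] (fun l => l ++ [s])) n2 s2 d h

theorem pvLoop3 (s3 : List Int) (n3 : List String) (d : PySem.Dict String (List Int))
    (h : n3.length ≤ s3.length) :
    List.foldl (fun d i =>
        (if d.contains (PySem.List.pyGetD n3 i "") = false
         then d.insert (PySem.List.pyGetD n3 i "") [0, 0]
         else if (d.getD (PySem.List.pyGetD n3 i "") []).length = 1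
              then d.modify (PySem.List.pyGetD n3 i "") [] (fun l => l ++ [0])
              else d).modify (PySem.List.pyGetD n3 i "") []
          (fun l => l ++ [PySem.List.pyGetD s3 i 0])) d
        (PySem.List.pyRange 0 (PySem.List.len n3))
      = List.foldl (fun d p =>
          (if d.contains p.2 = false then d.insert p.2 [0, 0]
           else if (d.getD p.2 []).length = 1 then d.modify p.2 [] (fun l => l ++ [0])
           else d).modify p.2 [] (fun l => l ++ [p.1])) d (s3.zip n3) :=
  pvRangeZip (fun d s n =>
    (if d.contains n = false then d.insert n [0, 0]
     else if (d.getD n []).length = 1 then d.modify n [] (fun l => l ++ [0]) else d).modify n []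
      (fun l => l ++ [s])) n3 s3 d h

-- insertBy commutes with map when the comparison agrees through the map
theorem pvInsertBy_map {α β : Type} (f : β → α) (ba : α → α → Bool) (bb : β → β → Bool)
    (hk : ∀ a b, ba (f a) (f b) = bb a b) :
    ∀ (x : β) (ys : List β),
      PySem.List.insertBy ba (f x) (ys.map f) = (PySem.List.insertBy bb x ys).map f := by
  intro x ys
  induction ys with
  | nil => simp [PySem.List.insertBy]
  | cons y yt ih =>
      simp only [List.map_cons, PySem.List.insertBy, hk]
      by_cases hb : bb x y <;> simp [hb, ih]

theorem pvFoldl_insertBy_map {α β : Type} (f : β → α) (ba : α → α → Bool) (bb : β → β → Bool)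
    (hk : ∀ a b, ba (f a) (f b) = bb a b) :
    ∀ (xs : List β) (acc : List β),
      (xs.map f).foldl (fun acc x => PySem.List.insertBy ba x acc) (acc.map f)
        = (xs.foldl (fun acc x => PySem.List.insertBy bb x acc) acc).map f := by
  intro xs
  induction xs with
  | nil => intro acc; simp
  | cons x xt ih =>
      intro acc
      simp only [List.map_cons, List.foldl_cons]
      rw [pvInsertBy_map f ba bb hk x acc]
      exact ih _

theorem pvSorted2_map (l : List (String × List Int)) :
    PySem.List.sorted2 (l.map pvF) (fun it => it.2) (fun it => it.1) true
      = (PySem.List.sorted2 l (fun it => it.2.sum) (fun it => it.1) true).map pvF := by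
  unfold PySem.List.sorted2
  have h := pvFoldl_insertBy_map pvF
      (fun a b => decide (b.2 < a.2) || (!decide (a.2 < b.2) && decide (b.1 < a.1)))
      (fun a b => decide (b.2.sum < a.2.sum) || (!decide (a.2.sum < b.2.sum) && decide (b.1 < a.1)))
      (fun a b => rfl) l []
  simpa using h

-- the same commutation for B's side: sorting key-value pairs vs sorting the keys directly
theorem pvSorted2_map2 (g : String → Int) (names : List String) :
    PySem.List.sorted2 (names.map (fun k => (k, g k))) (fun it => it.2) (fun it => it.1) true
      = (PySem.List.sorted2 names (fun nm => g nm) (fun nm => nm) true).map (fun k => (k, g k)) := by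
  unfold PySem.List.sorted2
  have h := pvFoldl_insertBy_map (fun k : String => (k, g k))
      (fun a b : String × Int => decide (b.2 < a.2) || (!decide (a.2 < b.2) && decide (b.1 < a.1)))
      (fun a b : String => decide (g b < g a) || (!decide (g a < g b) && decide (b < a)))
      (fun a b => rfl) names []
  simpa using h

-- both sorted item lists project to the same name list
theorem pvFinal (dA : PySem.Dict String (List Int)) (dB : PySem.Dict String Int)
    (h : pvR dA dB) :
    List.foldl (fun answer item => answer ++ [item.1]) []
        (PySem.List.sorted2 dA.items (fun item => item.2.sum) (fun item => item.1) true)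
      = (PySem.List.sorted2 dB.items (fun it => it.2) (fun it => it.1) true).map (fun it => it.1) := by
  have he : dB.items = dA.items.map pvF := h
  rw [he, pvSorted2_map, List.map_map]
  have hm := PySem.List.foldl_append_singleton_eq_map
      (fun item : String × List Int => item.1)
      (PySem.List.sorted2 dA.items (fun item => item.2.sum) (fun item => item.1) true) []
  rw [List.nil_append] at hm
  rw [hm]
  rfl

-- STAGE 1 conclusion: A's output, via the int dict
theorem pvA_eq (s1 : List Int) (n1 : List String) (s2 : List Int) (n2 : List String)
    (s3 : List Int) (n3 : List String)
    (h1 : n1.length ≤ s1.length) (h2 : n2.length ≤ s2.length) (h3 : n3.length ≤ s3.length) :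
    solution s1 n1 s2 n2 s3 n3
      = (PySem.List.sorted2 (pvDictB s1 n1 s2 n2 s3 n3).items
          (fun it => it.2) (fun it => it.1) true).map (fun it => it.1) := by
  simp only [solution, pvDictB]
  rw [pvLoop1 s1 n1 _ h1, pvLoop2 s2 n2 _ h2, pvLoop3 s3 n3 _ h3]
  apply pvFinal
  apply pvFoldl_rel pvR _ _ (fun c d a h => pvStep3_R c d h a.2 a.1)
  apply pvFoldl_rel pvR _ _ (fun c d a h => pvStep2_R c d h a.2 a.1)
  apply pvFoldl_rel pvR _ _ (fun c d a h => by simpa using pvInsert_R c d h a.2 [a.1])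
  rfl

-- STAGE 2: the int dict's keys are B's ordered distinct-name list
theorem pvKeys (s1 : List Int) (n1 : List String) (s2 : List Int) (n2 : List String)
    (s3 : List Int) (n3 : List String)
    (h1 : n1.length ≤ s1.length) (h2 : n2.length ≤ s2.length) (h3 : n3.length ≤ s3.length) :
    (pvDictB s1 n1 s2 n2 s3 n3).keys
      = (n1 ++ n2 ++ n3).foldl (fun ks n => if ks.contains n then ks else ks ++ [n]) [] := by
  have hstep : (fun (ks : List String) n => if ks.contains n then ks else ks ++ [n])
      = PySem.Set.add := by
    funext ks n
    simp [PySem.Set.add, PySem.Set.contains]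
  rw [hstep, List.foldl_append, List.foldl_append]
  simp only [pvDictB]
  rw [PySem.Dict.keys_foldl_modify_key (s3.zip n3) Prod.snd 0 (fun _ p t => t + p.1),
      PySem.Dict.keys_foldl_modify_key (s2.zip n2) Prod.snd 0 (fun _ p t => t + p.1),
      PySem.Dict.keys_foldl_insert_key (s1.zip n1) Prod.snd (fun _ p => p.1)]
  rw [List.map_snd_zip h1, List.map_snd_zip h2, List.map_snd_zip h3]
  rfl

theorem pvNodupKeys (s1 : List Int) (n1 : List String) (s2 : List Int) (n2 : List String)
    (s3 : List Int) (n3 : List String) : (pvDictB s1 n1 s2 n2 s3 n3).keys.Nodup := by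
  simp only [pvDictB]
  apply PySem.Dict.nodup_keys_foldl_modify_key (s3.zip n3) Prod.snd 0 (fun _ p t => t + p.1)
  apply PySem.Dict.nodup_keys_foldl_modify_key (s2.zip n2) Prod.snd 0 (fun _ p t => t + p.1)
  apply PySem.Dict.nodup_keys_foldl_insert_key (s1.zip n1) Prod.snd (fun _ p => p.1)
  exact PySem.Dict.nodup_keys_empty

-- STAGE 3: the int dict's value at any name is B's rescanned total
theorem pvGetD_fold_insert (nm : String) :
    ∀ (l : List (Int × String)) (d : PySem.Dict String Int),
      (l.foldl (fun d p => d.insert p.2 p.1) d).getD nm 0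
        = l.foldl (fun t p => if p.2 == nm then p.1 else t) (d.getD nm 0) := by
  intro l
  induction l with
  | nil => intro d; rfl
  | cons p rest ih =>
      intro d
      rw [List.foldl_cons, List.foldl_cons, ih]
      by_cases h : nm = p.2
      · simp [h]
      · have : (p.2 == nm) = false := by simp [Ne.symm h]
        simp [PySem.Dict.getD_insert, h, this]

theorem pvGetD_fold_modify (nm : String) :
    ∀ (l : List (Int × String)) (d : PySem.Dict String Int),
      (l.foldl (fun d p => d.modify p.2 0 (fun t => t + p.1)) d).getD nm 0
        = l.foldl (fun t p => if p.2 == nm then t + p.1 else t) (d.getD nm 0) := by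
  intro l
  induction l with
  | nil => intro d; rfl
  | cons p rest ih =>
      intro d
      rw [List.foldl_cons, List.foldl_cons, ih]
      by_cases h : nm = p.2
      · simp [h]
      · have : (p.2 == nm) = false := by simp [Ne.symm h]
        simp [PySem.Dict.getD_modify, h, this]

-- a fold over zip(names, steps) is the fold over zip(steps, names) with the pair swapped
theorem pvZipSwap {δ : Type} (g : δ → Int → String → δ) (ns : List String) (ss : List Int) (a : δ) :
    (ns.zip ss).foldl (fun a p => g a p.2 p.1) a = (ss.zip ns).foldl (fun a p => g a p.1 p.2) a := by
  rw [← List.zip_swap ss ns, List.foldl_map]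
  simp only [Prod.fst_swap, Prod.snd_swap]

theorem pvTot (s1 : List Int) (n1 : List String) (s2 : List Int) (n2 : List String)
    (s3 : List Int) (n3 : List String) (nm : String) :
    (pvDictB s1 n1 s2 n2 s3 n3).getD nm 0
      = (n3.zip s3).foldl (fun t p => if p.1 == nm then t + p.2 else t)
          ((n2.zip s2).foldl (fun t p => if p.1 == nm then t + p.2 else t)
            ((n1.zip s1).foldl (fun t p => if p.1 == nm then p.2 else t) 0)) := by
  simp only [pvDictB]
  rw [pvGetD_fold_modify nm, pvGetD_fold_modify nm, pvGetD_fold_insert nm]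
  rw [pvZipSwap (fun t s n => if n == nm then t + s else t) n3 s3,
      pvZipSwap (fun t s n => if n == nm then t + s else t) n2 s2,
      pvZipSwap (fun t s n => if n == nm then s else t) n1 s1]
  rfl

-- ===== VERDICT (by name: the statements are the Claim_ definitions above) =====
theorem solution_spec : Claim_equal_solution := by
  intro s1 n1 s2 n2 s3 n3 _ hpre
  obtain ⟨h1, h2, h3⟩ := hpre
  unfold Spec_solution
  rw [pvA_eq s1 n1 s2 n2 s3 n3 h1 h2 h3]
  rw [PySem.Dict.items_eq_map_keys (pvDictB s1 n1 s2 n2 s3 n3) (pvNodupKeys s1 n1 s2 n2 s3 n3) 0,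
      pvKeys s1 n1 s2 n2 s3 n3 h1 h2 h3]
  rw [pvSorted2_map2 (fun k => (pvDictB s1 n1 s2 n2 s3 n3).getD k 0), List.map_map]
  have hid : ((fun it : String × Int => it.1) ∘ fun k : String =>
      (k, (pvDictB s1 n1 s2 n2 s3 n3).getD k 0)) = id := rfl
  rw [hid, List.map_id]
  simp only [solution_alt]
  have hfun : (fun nm => (pvDictB s1 n1 s2 n2 s3 n3).getD nm 0)
      = (fun nm =>
          (n3.zip s3).foldl (fun t p => if p.1 == nm then t + p.2 else t)
            ((n2.zip s2).foldl (fun t p => if p.1 == nm then t + p.2 else t)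
              ((n1.zip s1).foldl (fun t p => if p.1 == nm then p.2 else t) 0))) :=
    funext (fun nm => pvTot s1 n1 s2 n2 s3 n3 nm)
  rw [hfun]
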